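-- pv_equiv track=rewrite | github.com/Mystaken/code-reviewer-2.0 | a2/student2/a2/regex_functions.py | perms_helper
-- ===== SOURCE A (Python) =====
-- def perms_helper(letter, oldString):
--     '''
--     (str, str) -> list of str
--     Given a letter and a string, returns a list containing the letter
--     inserted at all points in the string. Does not return repetitions.
--     >>>perms_helper('a', 'bnnn')
--     ['abnnn', 'bannn', 'bnann', 'bnnan', 'bnnna']
--     >>>perms_helper('o', 'll')
--     ['oll', 'lol', 'llo']
--     '''
--     finalList = []
--     # inserts before and after every character in the given string
--     for index in range(len(oldString)+1):
--
--         # inserting letter at index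
--         newString = oldString[0:index] + letter + oldString[index:]
--
--         # avoids checking empty list for repetition
--         if len(finalList) > 0:
--
--             if finalList[-1] != newString:
--                 finalList.append(newString)
--         else:
--             finalList.append(newString)
--     return finalList
-- ===== SOURCE B (Python) =====
-- def perms_helper(letter, oldString):
--     '''Run-based version: the insertion at position p repeats the one at p-1
--     exactly when letter commutes with oldString[p-1] (letter+c == c+letter),
--     so we scan oldString as maximal runs of equal characters and emit the
--     whole block of insertions of a run only when its character does not
--     commute with letter; the front insertion is always kept.'''
--     n = len(oldString)
--     results = [letter + oldString]
--     i = 0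
--     while i < n:
--         c = oldString[i]
--         j = i
--         while j < n and oldString[j] == c:
--             j += 1
--         if letter + c != c + letter:
--             for p in range(i + 1, j + 1):
--                 results.append(oldString[:p] + letter + oldString[p:])
--         i = j
--     return results
-- ===== Notes on version B (the rewrite author's own statement) =====
-- stated objective: alternative
-- what changed: Replaces A's single index loop, which builds every insertion and compares it with finalList[-1], by a run-based scan: oldString is traversed as maximal runs of equal characters and a run's whole block of insertions is emitted (or skipped) at once depending on whether letter commutes with the run's character, with no look-back at built strings.
import Mathlib
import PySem

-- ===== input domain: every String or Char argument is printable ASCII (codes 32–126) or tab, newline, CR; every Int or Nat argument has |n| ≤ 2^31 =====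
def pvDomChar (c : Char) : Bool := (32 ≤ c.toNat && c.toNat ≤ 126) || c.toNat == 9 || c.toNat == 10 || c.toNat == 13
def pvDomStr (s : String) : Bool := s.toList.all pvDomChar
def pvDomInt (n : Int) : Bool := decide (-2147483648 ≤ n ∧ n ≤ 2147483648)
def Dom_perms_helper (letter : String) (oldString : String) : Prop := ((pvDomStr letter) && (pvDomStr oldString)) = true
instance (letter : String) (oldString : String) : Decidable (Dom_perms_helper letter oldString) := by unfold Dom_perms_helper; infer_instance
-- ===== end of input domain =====

-- B replaces A's index loop (slices + comparison with finalList[-1]) by a run-based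
-- algorithm: scan oldString as maximal runs of equal characters and emit each run's
-- block of insertions only when letter does not commute with the run's character; no
-- look-back at built strings. Objective: alternative (same cost, different structure).


-- ===== PORT A =====
-- A-side helper: the loop body of A's 'for index in range(len(oldString)+1)'.
def pvStepA (letter : String) (oldString : String) (finalList : List String) (index : Int) : List String :=
  let newString := PySem.Str.slice oldString (some 0) (some index) ++ letter ++ PySem.Str.slice oldString (some index) none
  if 0 < finalList.length then
    if PySem.List.pyGet? finalList (-1) ≠ some newString then finalList ++ [newString]
    else finalList
  else finalList ++ [newString]

def perms_helper (letter : String) (oldString : String) : List String :=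
  (PySem.List.pyRange 0 (PySem.Str.len oldString + 1) 1).foldl (pvStepA letter oldString) []

-- ===== PORT B =====
-- B-side helpers: the inner 'while j < n and oldString[j] == c: j += 1' scan, and the
-- outer 'while i < n' loop of Source B (oldString viewed through its character list for
-- indexing; slices and string building exactly as in Source B).
def pvRunEnd (cs : List Char) (c : Char) (j : Nat) : Nat :=
  if h : j < cs.length then
    if cs[j] = c then pvRunEnd cs c (j + 1) else j
  else j
termination_by cs.length - j

-- the scan never moves left (the port's outer loop cites this for termination)
theorem pvRunEnd_ge (cs : List Char) (c : Char) (j : Nat) : j ≤ pvRunEnd cs c j := by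
  rw [pvRunEnd]
  split
  · split
    · have := pvRunEnd_ge cs c (j + 1); omega
    · exact le_refl j
  · exact le_refl j
termination_by cs.length - j

theorem pvRunEnd_gt (cs : List Char) (c : Char) (j : Nat) (h : j < cs.length)
    (hc : cs[j] = c) : j < pvRunEnd cs c j := by
  rw [pvRunEnd, dif_pos h, if_pos hc]
  have := pvRunEnd_ge cs c (j + 1); omega

def pvOuterB (letter s : String) (i : Nat) (acc : List String) : List String :=
  if h : i < s.toList.length then
    pvOuterB letter s (pvRunEnd s.toList (s.toList[i]) i)
      (if letter ++ String.ofList [s.toList[i]] != String.ofList [s.toList[i]] ++ letter then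
        (PySem.List.pyRange ((i : Int) + 1) ((pvRunEnd s.toList (s.toList[i]) i : Int) + 1) 1).foldl
          (fun a p => a ++ [PySem.Str.slice s none (some p) ++ letter ++ PySem.Str.slice s (some p) none]) acc
      else acc)
  else acc
termination_by s.toList.length - i
decreasing_by
  have h1 : i < pvRunEnd s.toList (s.toList[i]) i := pvRunEnd_gt _ _ i h rfl
  omega

def perms_helper_alt (letter : String) (oldString : String) : List String :=
  pvOuterB letter oldString 0 [letter ++ oldString]

-- ===== PRECONDITION & SPEC =====
def Spec_perms_helper (letter : String) (oldString : String) (out : List String) : Prop := out = perms_helper_alt letter oldString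
instance (letter : String) (oldString : String) (out : List String) : Decidable (Spec_perms_helper letter oldString out) := by unfold Spec_perms_helper; infer_instance

-- ===== CLAIM (what is proved, stated in full; the proofs are below) =====
def Claim_equal_perms_helper : Prop := ∀ (letter : String) (oldString : String), Dom_perms_helper letter oldString → Spec_perms_helper letter oldString (perms_helper letter oldString)

-- ===== LEMMAS AND PROOFS =====

-- A's insertion at index i, and the 'keep' condition (i = 0 or insertion i differs
-- from insertion i-1), at the String level; used only by the proofs.
def pvIns (letter : String) (oldString : String) (i : Int) : String :=
  PySem.Str.slice oldString none (some i) ++ letter ++ PySem.Str.slice oldString (some i) none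

def pvCond (letter : String) (oldString : String) (i : Int) : Bool :=
  i == 0 ||
    (letter ++ PySem.Str.slice oldString (some (i - 1)) (some i)) !=
      (PySem.Str.slice oldString (some (i - 1)) (some i) ++ letter)

-- the same two notions on the character-list level
def pvInsN (L cs : List Char) (k : Nat) : List Char := cs.take k ++ L ++ cs.drop k

def pvCondN (L cs : List Char) (k : Nat) : Bool :=
  k == 0 || decide (L ++ (cs.drop (k-1)).take 1 ≠ (cs.drop (k-1)).take 1 ++ L)

-- char-list model of A's filtered comprehension
def pvFN (L cs : List Char) : List (List Char) :=
  ((List.range (cs.length + 1)).filter (pvCondN L cs)).map (pvInsN L cs)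

-- s[0:b] = s[:b] on the String level
theorem pvSliceZero (s : String) (b? : Option Int) :
    PySem.Str.slice s (some 0) b? = PySem.Str.slice s none b? := by
  rw [String.ext_iff]; simp [pysem]

-- A's loop-body string equals the insertion at that index
theorem pvNewEqIns (letter s : String) (i : Int) :
    PySem.Str.slice s (some 0) (some i) ++ letter ++ PySem.Str.slice s (some i) none
      = pvIns letter s i := by
  rw [pvSliceZero]; rfl

theorem pvMidSwap (t L d : List Char) (a : Char) :
    ((t ++ [a]) ++ L) ++ d = (t ++ L) ++ ([a] ++ d) ↔ L ++ [a] = [a] ++ L := by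
  constructor
  · intro h
    have h' : ([a] ++ L) ++ d = (L ++ [a]) ++ d := by
      have := (List.append_right_inj t).mp (by simpa [List.append_assoc] using h)
      simpa [List.append_assoc] using this
    exact ((List.append_left_inj d).mp h').symm
  · intro h
    have h' : ([a] ++ L) ++ d = (L ++ [a]) ++ d := by rw [h.symm]
    have := (List.append_right_inj t).mpr (by simpa [List.append_assoc] using h')
    simpa [List.append_assoc] using this

-- consecutive insertions coincide iff letter commutes with the preceding character
theorem pvInsSuccEq (letter s : String) (k : Nat) (hk : k < s.toList.length) :
    (pvIns letter s ((k : Int) + 1) = pvIns letter s (k : Int)) ↔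
      letter ++ PySem.Str.slice s (some (k : Int)) (some ((k : Int) + 1))
        = PySem.Str.slice s (some (k : Int)) (some ((k : Int) + 1)) ++ letter := by
  have ht1 : ((k : Int) + 1).toNat = k + 1 := by omega
  have ht0 : ((k : Int)).toNat = k := by omega
  have h1 : (PySem.Str.slice s none (some ((k : Int) + 1))).toList
      = s.toList.take k ++ [s.toList[k]] := by
    simp only [pysem, PySem.List.slice_to s.toList (by omega : (0:Int) ≤ (k:Int)+1), ht1]
    exact List.take_succ_eq_append_getElem hk
  have h2 : (PySem.Str.slice s (some ((k : Int) + 1)) none).toList = s.toList.drop (k + 1) := by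
    simp only [pysem, PySem.List.slice_from s.toList (by omega : (0:Int) ≤ (k:Int)+1), ht1]
  have h3 : (PySem.Str.slice s none (some (k : Int))).toList = s.toList.take k := by
    simp only [pysem, PySem.List.slice_to s.toList (by omega : (0:Int) ≤ (k:Int)), ht0]
  have h4 : (PySem.Str.slice s (some (k : Int)) none).toList
      = [s.toList[k]] ++ s.toList.drop (k + 1) := by
    simp only [pysem, PySem.List.slice_from s.toList (by omega : (0:Int) ≤ (k:Int)), ht0]
    rw [List.drop_eq_getElem_cons hk]; rfl
  have h5 : (PySem.Str.slice s (some (k : Int)) (some ((k : Int) + 1))).toList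
      = [s.toList[k]] := by
    simp only [pysem,
      PySem.List.slice_toNat s.toList (by omega : (0:Int) ≤ (k:Int)) (by omega : (0:Int) ≤ (k:Int)+1),
      ht0, ht1]
    rw [List.drop_eq_getElem_cons hk, show k + 1 - k = 1 by omega, List.take_succ_cons,
      List.take_zero]
  rw [pvIns, pvIns, String.ext_iff, String.ext_iff]
  simp only [String.toList_append, h1, h2, h3, h4, h5]
  exact pvMidSwap _ _ _ _

theorem pvCondSucc (letter s : String) (k : Nat) (hk : k < s.toList.length) :
    (pvCond letter s ((k : Int) + 1) = true ↔
      pvIns letter s ((k : Int) + 1) ≠ pvIns letter s (k : Int)) := by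
  have hsub : ((k : Int) + 1 - 1) = (k : Int) := by ring
  have h0 : ¬((k : Int) + 1 = 0) := by omega
  rw [pvCond, hsub]
  simp only [Bool.or_eq_true, beq_iff_eq, bne_iff_ne, h0, false_or]
  exact (not_congr (pvInsSuccEq letter s k hk)).symm

-- loop invariant: A's accumulator is the filtered-insertion list, ending with the last insertion
theorem pvInv (letter s : String) (m : Nat) (hm : m ≤ s.toList.length) :
    (PySem.List.pyRange 0 ((m : Int) + 1) 1).foldl (pvStepA letter s) [] =
      ((PySem.List.pyRange 0 ((m : Int) + 1) 1).filter (pvCond letter s)).map (pvIns letter s)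
    ∧ ((PySem.List.pyRange 0 ((m : Int) + 1) 1).foldl (pvStepA letter s) []).getLast?
        = some (pvIns letter s (m : Int)) := by
  induction m with
  | zero =>
    have hr : PySem.List.pyRange 0 (((0 : Nat) : Int) + 1) 1 = [(0 : Int)] := by decide
    rw [hr]
    have hc : pvCond letter s 0 = true := by simp [pvCond]
    have hs : pvStepA letter s [] 0 = [pvIns letter s 0] := by
      simp [pvStepA, pvNewEqIns]
    constructor
    · simp [hc, hs, List.foldl, List.filter]
    · simp [hs, List.foldl]
  | succ m ih =>
    have hk : m < s.toList.length := by omega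
    obtain ⟨hA, hL⟩ := ih (by omega)
    have hcast : ((m + 1 : Nat) : Int) + 1 = ((m : Int) + 1) + 1 := by push_cast; ring
    have hsplit : PySem.List.pyRange 0 (((m + 1 : Nat) : Int) + 1) 1
        = PySem.List.pyRange 0 ((m : Int) + 1) 1 ++ [(m : Int) + 1] := by
      rw [hcast]
      exact PySem.List.pyRange_one_succ_right (by omega : (0:Int) ≤ (m:Int)+1)
    rw [hsplit, List.foldl_append, List.filter_append, List.map_append]
    set prev := (PySem.List.pyRange 0 ((m : Int) + 1) 1).foldl (pvStepA letter s) [] with hprev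
    have hne : prev ≠ [] := by
      intro h; rw [h] at hL; simp at hL
    have hlen : 0 < prev.length := List.length_pos_iff.mpr hne
    have hstep : List.foldl (pvStepA letter s) prev [(m : Int) + 1]
        = pvStepA letter s prev ((m : Int) + 1) := rfl
    have hcast2 : ((m + 1 : Nat) : Int) = (m : Int) + 1 := by push_cast; ring
    rw [hstep, pvStepA]
    simp only [pvNewEqIns, if_pos hlen, PySem.List.pyGet?_neg_one, hL]
    by_cases hEq : pvIns letter s ((m : Int) + 1) = pvIns letter s (m : Int)
    · have hcond : pvCond letter s ((m : Int) + 1) = false := by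
        rcases Bool.eq_false_or_eq_true (pvCond letter s ((m : Int) + 1)) with h | h
        · exact absurd hEq ((pvCondSucc letter s m hk).mp h)
        · exact h
      rw [if_neg (by simp only [ne_eq, Option.some.injEq, not_not]; exact hEq.symm)]
      refine ⟨?_, ?_⟩
      · rw [List.filter_cons, hcond]
        simpa using hA
      · rw [hcast2, hEq]; exact hL
    · have hcond : pvCond letter s ((m : Int) + 1) = true :=
        (pvCondSucc letter s m hk).mpr hEq
      rw [if_pos (by simp only [ne_eq, Option.some.injEq]; exact fun h => hEq h.symm)]
      refine ⟨?_, ?_⟩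
      · rw [List.filter_cons, hcond, hA]; simp
      · rw [hcast2]; exact List.getLast?_concat

-- String-level notions project to the char-list ones
theorem pvIns_toList (letter s : String) (k : Nat) :
    (pvIns letter s (k : Int)).toList = pvInsN letter.toList s.toList k := by
  simp [pvIns, pvInsN, pysem]

theorem pvCond_eq (letter s : String) (k : Nat) :
    pvCond letter s (k : Int) = pvCondN letter.toList s.toList k := by
  cases k with
  | zero => simp [pvCond, pvCondN]
  | succ m =>
    have hsub : ((m + 1 : Nat) : Int) - 1 = (m : Int) := by push_cast; ring
    have hsl : (PySem.Str.slice s (some (m : Int)) (some ((m : Int) + 1))).toList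
        = (s.toList.drop m).take 1 := by
      have := PySem.List.slice_natCast_add (xs := s.toList) (j := m) (n := 1)
      simp [pysem] at this ⊢
      exact_mod_cast this
    have hcast : ((m + 1 : Nat) : Int) = (m : Int) + 1 := by push_cast; ring
    have hne : ((m : Int) + 1) ≠ 0 := by omega
    rw [pvCond, pvCondN, hsub, hcast, Bool.eq_iff_iff]
    simp [String.ext_iff, hsl, hne]

-- A equals the char-list model
theorem pvA_eq (letter s : String) :
    perms_helper letter s = (pvFN letter.toList s.toList).map String.ofList := by
  have hl : PySem.Str.len s = ((s.toList.length : Nat) : Int) := by simp [pysem]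
  rw [perms_helper, hl, (pvInv letter s s.toList.length le_rfl).1]
  rw [PySem.List.pyRange_one 0 ((s.toList.length : Int) + 1)]
  have htn : (((s.toList.length : Int) + 1) - 0).toNat = s.toList.length + 1 := by omega
  rw [htn, List.filter_map, List.map_map, pvFN, List.map_map]
  have hfc : (List.range (s.toList.length + 1)).filter ((pvCond letter s) ∘ fun k : Nat => 0 + (k : Int))
      = (List.range (s.toList.length + 1)).filter (pvCondN letter.toList s.toList) := by
    apply List.filter_congr
    intro k _
    simp only [Function.comp_apply, zero_add]
    exact pvCond_eq letter s k
  rw [hfc]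
  apply List.map_congr_left
  intro k _
  simp only [Function.comp_apply, zero_add]
  rw [String.ext_iff]
  simp [pvIns_toList]


-- every index inside the scanned run holds the run's character, and the scan stays in range
theorem pvRunEnd_le (cs : List Char) (c : Char) (j : Nat) (hj : j ≤ cs.length) :
    pvRunEnd cs c j ≤ cs.length := by
  rw [pvRunEnd]
  split
  · split
    · exact pvRunEnd_le cs c (j + 1) (by omega)
    · exact hj
  · exact hj
termination_by cs.length - j

theorem pvRunEnd_run (cs : List Char) (c : Char) (j : Nat) :
    ∀ m, j ≤ m → m < pvRunEnd cs c j → cs[m]? = some c := by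
  intro m hjm hm
  rw [pvRunEnd] at hm
  by_cases h : j < cs.length
  · rw [dif_pos h] at hm
    by_cases hc : cs[j] = c
    · rw [if_pos hc] at hm
      by_cases hmj : m = j
      · subst hmj
        rw [List.getElem?_eq_getElem h, hc]
      · exact pvRunEnd_run cs c (j + 1) m (by omega) hm
    · rw [if_neg hc] at hm; omega
  · rw [dif_neg h] at hm; omega
termination_by cs.length - j

-- on a run of the character c, the keep-condition is 'letter does not commute with c'
theorem pvCondN_run (L cs : List Char) (c : Char) (p : Nat) (hp : 1 ≤ p)
    (hc : cs[p - 1]? = some c) :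
    pvCondN L cs p = !decide (L ++ [c] = [c] ++ L) := by
  have hlt : p - 1 < cs.length := by
    by_contra hge
    simp [List.getElem?_eq_none (show cs.length ≤ p - 1 by omega)] at hc
  have hgc : cs[p - 1]'hlt = c := by
    rw [List.getElem?_eq_getElem hlt] at hc
    exact Option.some.inj hc
  have htake : (cs.drop (p - 1)).take 1 = [c] := by
    rw [List.drop_eq_getElem_cons hlt, hgc, List.take_succ_cons, List.take_zero]
  have h0 : (p == 0) = false := by simp; omega
  rw [pvCondN, h0, htake]
  simp [decide_not]

-- the Bool the port branches on is the char-list commuting test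
theorem pvBne_eq (letter : String) (c : Char) :
    (letter ++ String.ofList [c] != String.ofList [c] ++ letter)
      = !decide (letter.toList ++ [c] = [c] ++ letter.toList) := by
  rw [Bool.eq_iff_iff]; simp [String.ext_iff]

-- the port's emission foldl is the block of insertions of the run
theorem pvEmit_eq (letter s : String) (i j : Nat) (acc : List String) (hij : i ≤ j) :
    (PySem.List.pyRange ((i : Int) + 1) ((j : Int) + 1) 1).foldl
        (fun a p => a ++ [PySem.Str.slice s none (some p) ++ letter ++ PySem.Str.slice s (some p) none]) acc
      = acc ++ (List.range' (i + 1) (j - i)).map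
          (fun p => String.ofList (pvInsN letter.toList s.toList p)) := by
  rw [PySem.List.foldl_append_singleton_eq_map]
  congr 1
  rw [PySem.List.pyRange_one, List.range'_eq_map_range, List.map_map, List.map_map]
  have htn : (((j : Int) + 1) - ((i : Int) + 1)).toNat = j - i := by omega
  rw [htn]
  apply List.map_congr_left
  intro k _
  simp only [Function.comp_apply]
  have hcast : ((i : Int) + 1) + (k : Int) = (((i + 1 + k : Nat)) : Int) := by push_cast; ring
  rw [String.ext_iff, hcast]
  simp only [pysem, pvInsN, String.toList_append, List.append_assoc, String.toList_ofList]

-- loop invariant of B's outer while loop: from index i on, it appends exactly the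
-- kept insertions at positions i+1 .. n
theorem pvOuterB_eq (letter s : String) (i : Nat) (acc : List String)
    (hi : i ≤ s.toList.length) :
    pvOuterB letter s i acc
      = acc ++ ((List.range' (i + 1) (s.toList.length - i)).filter
            (pvCondN letter.toList s.toList)).map
          (fun p => String.ofList (pvInsN letter.toList s.toList p)) := by
  rw [pvOuterB]
  by_cases h : i < s.toList.length
  · rw [dif_pos h]
    obtain ⟨c, hc⟩ : ∃ c, s.toList[i] = c := ⟨_, rfl⟩
    obtain ⟨j, hj⟩ : ∃ j, pvRunEnd s.toList c i = j := ⟨_, rfl⟩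
    rw [hc, hj]
    have hij : i < j := hj ▸ pvRunEnd_gt _ _ i h hc
    have hjn : j ≤ s.toList.length := hj ▸ pvRunEnd_le s.toList c i (by omega)
    have hsplit : List.range' (i + 1) (s.toList.length - i)
        = List.range' (i + 1) (j - i) ++ List.range' (j + 1) (s.toList.length - j) := by
      have h1 := List.range'_append_1 (s := i + 1) (m := j - i) (n := s.toList.length - j)
      rw [show (i + 1) + (j - i) = j + 1 by omega,
        show (j - i) + (s.toList.length - j) = s.toList.length - i by omega] at h1
      exact h1.symm
    have hcondp : ∀ p ∈ List.range' (i + 1) (j - i),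
        pvCondN letter.toList s.toList p
          = !decide (letter.toList ++ [c] = [c] ++ letter.toList) := by
      intro p hp
      rw [List.mem_range'_1] at hp
      refine pvCondN_run letter.toList s.toList c p (by omega) ?_
      exact pvRunEnd_run s.toList c i (p - 1) (by omega) (by omega)
    by_cases hcm : letter.toList ++ [c] = [c] ++ letter.toList
    · -- letter commutes with the run's character: the whole run is skipped
      rw [if_neg (by rw [pvBne_eq, hcm]; simp)]
      rw [pvOuterB_eq letter s j acc (by omega), hsplit, List.filter_append]
      have hnil : (List.range' (i + 1) (j - i)).filter (pvCondN letter.toList s.toList) = [] := by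
        rw [List.filter_eq_nil_iff]
        intro p hp
        rw [hcondp p hp, hcm]; simp
      rw [hnil, List.nil_append]
    · -- the whole run's block of insertions is emitted
      rw [if_pos (by rw [pvBne_eq]; simp; simpa using hcm)]
      rw [pvEmit_eq letter s i j acc (by omega)]
      rw [pvOuterB_eq letter s j _ (by omega), hsplit, List.filter_append]
      have hall : (List.range' (i + 1) (j - i)).filter (pvCondN letter.toList s.toList)
          = List.range' (i + 1) (j - i) := by
        rw [List.filter_eq_self]
        intro p hp
        rw [hcondp p hp]; simp; simpa using hcm
      rw [hall, List.map_append, List.append_assoc]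
  · rw [dif_neg h]
    rw [show s.toList.length - i = 0 by omega]
    simp
termination_by s.toList.length - i
decreasing_by all_goals omega

-- ===== VERDICT (by name: the statement is the Claim_ definition above) =====
theorem perms_helper_spec : Claim_equal_perms_helper := by
  intro letter s _
  unfold Spec_perms_helper perms_helper_alt
  rw [pvA_eq, pvOuterB_eq letter s 0 [letter ++ s] (by omega), pvFN, Nat.sub_zero,
    List.range_eq_range', List.range'_succ]
  have hc0 : pvCondN letter.toList s.toList 0 = true := by simp [pvCondN]
  rw [List.filter_cons_of_pos hc0, List.map_cons, List.map_cons, List.map_map]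
  congr 1
  rw [String.ext_iff]
  simp [pvInsN]
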